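-- pv_equiv track=rewrite | github.com/ERATOMMSD/dynamic-shielding | python/benchmarks/car_racing/car_racing_specifications.py | no_consecutive_grass_duration
-- ===== SOURCE A (Python) =====
-- from typing import List
--
-- def no_consecutive_grass_duration(duration: int) -> str:
--     """
--     Args:
--         duration: int : the duration with no grass. We assume that duration is positive.
--     """
--     if duration <= 0:
--         raise IndexError(f'duration must be positive (duration: {duration})')
--
--     def add_next(original_formula: str) -> str:
--         return f'X({original_formula})'
--
--     formulas: List[str] = []
--     for i in range(duration):
--         formula = '(ArenaProposition.NORMAL || X(ArenaProposition.NORMAL))'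
--         for j in range(i):
--             formula = add_next(formula)
--         formulas.append(f'({formula})')
--     return ' & '.join(formulas)
-- ===== SOURCE B (Python) =====
-- def no_consecutive_grass_duration(duration: int) -> str:
--     """
--     Args:
--         duration: int : the duration with no grass. We assume that duration is positive.
--     """
--     if duration <= 0:
--         raise IndexError(f'duration must be positive (duration: {duration})')
--
--     formula = '(ArenaProposition.NORMAL || X(ArenaProposition.NORMAL))'
--     parts = []
--     for _ in range(duration):
--         parts.append(f'({formula})')
--         formula = f'X({formula})'
--     return ' & '.join(parts)
-- ===== Notes on version B (the rewrite author's own statement) =====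
-- stated objective: faster
-- what changed: Instead of rebuilding each conjunct's X(...) nesting from scratch with an inner loop, B keeps one running formula and wraps it once more with X(...) per iteration, removing the inner loop.
import Mathlib
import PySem

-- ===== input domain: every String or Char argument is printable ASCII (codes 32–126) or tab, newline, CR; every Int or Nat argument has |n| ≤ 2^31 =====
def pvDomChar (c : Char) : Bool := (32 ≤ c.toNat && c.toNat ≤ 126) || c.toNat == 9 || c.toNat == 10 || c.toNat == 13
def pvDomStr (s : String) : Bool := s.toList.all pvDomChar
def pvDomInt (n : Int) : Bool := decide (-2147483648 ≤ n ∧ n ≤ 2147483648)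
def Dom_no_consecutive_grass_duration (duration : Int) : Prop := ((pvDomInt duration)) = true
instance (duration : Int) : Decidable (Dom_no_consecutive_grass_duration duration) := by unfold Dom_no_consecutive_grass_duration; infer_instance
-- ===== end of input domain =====

-- B replaces A's inner re-wrapping loop by one incremental X(...) wrap per iteration: asymptotically faster.


-- ===== PORT A =====
-- helper add_next of A
def pvAddNext (s : String) : String := "X(" ++ s ++ ")"

def no_consecutive_grass_duration (duration : Int) : String :=
  let formulas : List String :=
    (PySem.List.pyRange 0 duration 1).foldl
      (fun acc i =>
        let formula :=
          (PySem.List.pyRange 0 i 1).foldl (fun f _ => pvAddNext f)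
            "(ArenaProposition.NORMAL || X(ArenaProposition.NORMAL))"
        acc ++ ["(" ++ formula ++ ")"]) []
  PySem.Str.join " & " formulas

-- ===== PORT B =====
def no_consecutive_grass_duration_alt (duration : Int) : String :=
  let st :=
    (PySem.List.pyRange 0 duration 1).foldl
      (fun (st : List String × String) _ =>
        (st.1 ++ ["(" ++ st.2 ++ ")"], "X(" ++ st.2 ++ ")"))
      ([], "(ArenaProposition.NORMAL || X(ArenaProposition.NORMAL))")
  PySem.Str.join " & " st.1

-- ===== PRECONDITION & SPEC =====
-- A (and B) raise IndexError for duration <= 0; those inputs are excluded.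
def Pre_no_consecutive_grass_duration (duration : Int) : Prop := 1 ≤ duration
instance (duration : Int) : Decidable (Pre_no_consecutive_grass_duration duration) := by unfold Pre_no_consecutive_grass_duration; infer_instance
def pvWitness_no_consecutive_grass_duration : Int := (3)

def Spec_no_consecutive_grass_duration (duration : Int) (out : String) : Prop := out = no_consecutive_grass_duration_alt duration
instance (duration : Int) (out : String) : Decidable (Spec_no_consecutive_grass_duration duration out) := by unfold Spec_no_consecutive_grass_duration; infer_instance

-- ===== CLAIM (what is proved, stated in full; the proofs are below) =====
def Claim_equal_no_consecutive_grass_duration : Prop := ∀ (duration : Int), Dom_no_consecutive_grass_duration duration → Pre_no_consecutive_grass_duration duration → Spec_no_consecutive_grass_duration duration (no_consecutive_grass_duration duration)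

-- ===== LEMMAS AND PROOFS =====

-- a fold that ignores its elements is an iterate
lemma foldl_ignore_iterate (l : List Int) (s : String) :
    l.foldl (fun f _ => pvAddNext f) s = pvAddNext^[l.length] s := by
  induction l generalizing s with
  | nil => rfl
  | cons x xs ih => simp [List.foldl, ih, Function.iterate_succ_apply]

-- A's inner loop at element i = n equals n-fold wrapping
lemma inner_eq_iterate (n : Nat) (s : String) :
    (PySem.List.pyRange 0 (n : Int) 1).foldl (fun f _ => pvAddNext f) s = pvAddNext^[n] s := by
  rw [foldl_ignore_iterate]
  simp [PySem.List.length_pyRange_one]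

-- the two folds over range n compute the same list; B's running formula is the n-th iterate
lemma folds_agree (n : Nat) :
    ((List.range n).map (fun (k : Nat) => ((0 : Int) + (k : Int)))).foldl
        (fun (st : List String × String) _ =>
          (st.1 ++ ["(" ++ st.2 ++ ")"], "X(" ++ st.2 ++ ")"))
        ([], "(ArenaProposition.NORMAL || X(ArenaProposition.NORMAL))")
      =
      (((List.range n).map (fun (k : Nat) => ((0 : Int) + (k : Int)))).foldl
        (fun acc i =>
          let formula :=
            (PySem.List.pyRange 0 i 1).foldl (fun f _ => pvAddNext f)
              "(ArenaProposition.NORMAL || X(ArenaProposition.NORMAL))"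
          acc ++ ["(" ++ formula ++ ")"]) [],
       pvAddNext^[n] "(ArenaProposition.NORMAL || X(ArenaProposition.NORMAL))") := by
  induction n with
  | zero => rfl
  | succ m ih =>
      rw [List.range_succ, List.map_append, List.foldl_append, List.foldl_append, ih]
      simp only [List.map_cons, List.map_nil, List.foldl_cons, List.foldl_nil]
      have h : ((0 : Int) + (m : Int)) = ((m : Nat) : Int) := by omega
      rw [h, inner_eq_iterate]
      simp [pvAddNext, Function.iterate_succ_apply']

-- ===== VERDICT (by name: the statement is the Claim_ definition above) =====
theorem no_consecutive_grass_duration_spec : Claim_equal_no_consecutive_grass_duration := by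
  intro d _ hpre
  have h1 : 1 ≤ d := hpre
  unfold Spec_no_consecutive_grass_duration no_consecutive_grass_duration no_consecutive_grass_duration_alt
  have hd : d = ((d.toNat : Nat) : Int) := by omega
  rw [hd, PySem.List.pyRange_one]
  simp only [Int.sub_zero, Int.toNat_natCast]
  rw [folds_agree]
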